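-- pv_equiv track=rewrite | github.com/codurance/sessionize-matching-fn | SessionizeMatching/matching.py | define_user_popularities
-- ===== SOURCE A (Python) =====
-- def define_user_popularities(users_preferences, language_popularities):
--     user_popularities = {}
--     for user, preferences in users_preferences.items():
--         popularity = 0
--         for language_priority, language in enumerate(reversed(preferences)):
--             language_priority += 1
--             popularity += (language_popularities[language] * language_priority)
--         user_popularities[user] = popularity
--     return user_popularities
-- ===== SOURCE B (Python) =====
-- def define_user_popularities(users_preferences, language_popularities):
--     def score(preferences):
--         running = 0
--         popularity = 0
--         for language in preferences:
--             running += language_popularities[language]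
--             popularity += running
--         return popularity
--     return {user: score(preferences)
--             for user, preferences in users_preferences.items()}
-- ===== Notes on version B (the rewrite author's own statement) =====
-- stated objective: simpler
-- what changed: B replaces the reversed-enumerate weighted sum with a forward pass over prefix sums (sum of running prefix sums equals the end-distance-weighted sum) and builds the result with a dict comprehension mapping each user to its score instead of mutating an accumulator dict.
import Mathlib
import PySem

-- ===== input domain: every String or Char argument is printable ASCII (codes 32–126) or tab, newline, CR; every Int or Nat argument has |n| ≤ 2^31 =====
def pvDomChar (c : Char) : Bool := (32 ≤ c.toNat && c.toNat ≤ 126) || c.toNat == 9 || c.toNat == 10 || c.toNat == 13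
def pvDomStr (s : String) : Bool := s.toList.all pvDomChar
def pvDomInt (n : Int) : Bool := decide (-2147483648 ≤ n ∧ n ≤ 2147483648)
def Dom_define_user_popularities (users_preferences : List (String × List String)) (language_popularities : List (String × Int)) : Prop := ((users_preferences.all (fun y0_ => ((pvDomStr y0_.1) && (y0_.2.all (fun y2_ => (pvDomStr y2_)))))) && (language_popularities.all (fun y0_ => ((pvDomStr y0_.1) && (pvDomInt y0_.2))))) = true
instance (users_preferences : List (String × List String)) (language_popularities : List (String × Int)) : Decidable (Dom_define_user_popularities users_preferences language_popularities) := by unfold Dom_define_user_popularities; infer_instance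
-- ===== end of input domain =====

-- B: forward prefix-sum scoring and a map over users instead of reversed-enumerate weighting into a mutated dict (objective: simpler).


-- ===== PORT A =====
-- inner loop of A: popularity = fold over enumerate(reversed(preferences)) adding value * (index+1)
def pvPopA (d : PySem.Dict String Int) (preferences : List String) : Int :=
  (PySem.List.enumerate preferences.reverse 0).foldl
    (fun popularity p => popularity + d.getD p.2 0 * (p.1 + 1)) 0

-- Port of A. The Python raises KeyError when a preference is missing from
-- language_popularities; Pre_ excludes those inputs, the default 0 is never used there.
def define_user_popularities (users_preferences : List (String × List String)) (language_popularities : List (String × Int)) : List (String × Int) :=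
  ((users_preferences.foldl
      (fun user_popularities up =>
        user_popularities.insert up.1 (pvPopA (PySem.Dict.ofList language_popularities) up.2))
      PySem.Dict.empty : PySem.Dict String Int)).items

-- ===== PORT B =====
-- B's score helper: tail recursion over the preferences carrying (running, popularity)
def pvScore (d : PySem.Dict String Int) (running popularity : Int) : List String → Int
  | [] => popularity
  | language :: rest =>
      pvScore d (running + d.getD language 0) (popularity + (running + d.getD language 0)) rest

-- B's dict comprehension over users_preferences.items()
def define_user_popularities_alt (users_preferences : List (String × List String)) (language_popularities : List (String × Int)) : List (String × Int) :=
  users_preferences.map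
    (fun up => (up.1, pvScore (PySem.Dict.ofList language_popularities) 0 0 up.2))

-- ===== PRECONDITION & SPEC =====
-- Pre_ excludes (a) inputs on which Python A raises KeyError (some preferred language
-- missing from language_popularities) and (b) association lists with duplicate user
-- keys, which do not represent any Python dict argument (users_preferences is a dict).
def Pre_define_user_popularities (users_preferences : List (String × List String)) (language_popularities : List (String × Int)) : Prop :=
  (users_preferences.map Prod.fst).Nodup ∧
  ∀ up ∈ users_preferences, ∀ language ∈ up.2, language ∈ language_popularities.map (·.1)
instance (users_preferences : List (String × List String)) (language_popularities : List (String × Int)) : Decidable (Pre_define_user_popularities users_preferences language_popularities) := by unfold Pre_define_user_popularities; infer_instance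

def pvWitness_define_user_popularities : (List (String × List String)) × (List (String × Int)) :=
  ([("alice", ["python", "lean"]), ("bob", ["lean"])], [("python", 3), ("lean", 5)])

def Spec_define_user_popularities (users_preferences : List (String × List String)) (language_popularities : List (String × Int)) (out : List (String × Int)) : Prop := out = define_user_popularities_alt users_preferences language_popularities
instance (users_preferences : List (String × List String)) (language_popularities : List (String × Int)) (out : List (String × Int)) : Decidable (Spec_define_user_popularities users_preferences language_popularities out) := by unfold Spec_define_user_popularities; infer_instance

-- ===== CLAIM =====
def Claim_equal_define_user_popularities : Prop := ∀ (users_preferences : List (String × List String)) (language_popularities : List (String × Int)), Dom_define_user_popularities users_preferences language_popularities → Pre_define_user_popularities users_preferences language_popularities → Spec_define_user_popularities users_preferences language_popularities (define_user_popularities users_preferences language_popularities)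

-- ===== LEMMAS AND PROOFS =====
-- the common value: sum of d[x] weighted by distance from the end
def pvW (d : PySem.Dict String Int) : List String → Int
  | [] => 0
  | x :: xs => d.getD x 0 * (xs.length + 1) + pvW d xs

theorem pvPopA_foldl_add (d : PySem.Dict String Int) (l : List (Int × String)) (a : Int) :
    l.foldl (fun popularity p => popularity + d.getD p.2 0 * (p.1 + 1)) a
      = a + l.foldl (fun popularity p => popularity + d.getD p.2 0 * (p.1 + 1)) 0 := by
  induction l generalizing a with
  | nil => simp
  | cons p l ih =>
    simp only [List.foldl_cons]
    rw [ih, ih (0 + _)]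
    ring

theorem pvPopA_eq_pvW (d : PySem.Dict String Int) (xs : List String) :
    pvPopA d xs = pvW d xs := by
  induction xs with
  | nil => simp [pvPopA, pvW]
  | cons x xs ih =>
    unfold pvPopA at *
    rw [List.reverse_cons, PySem.List.enumerate_append, List.foldl_append, pvPopA_foldl_add]
    rw [ih]
    simp [PySem.List.enumerate, pvW]
    ring

theorem pvScore_eq (d : PySem.Dict String Int) (xs : List String) (r p : Int) :
    pvScore d r p xs = p + r * xs.length + pvW d xs := by
  induction xs generalizing r p with
  | nil => simp [pvScore, pvW]
  | cons x xs ih =>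
    simp only [pvScore, pvW, List.length_cons]
    rw [ih]
    push_cast
    ring

-- ===== VERDICT =====
theorem define_user_popularities_spec : Claim_equal_define_user_popularities := by
  intro ups lps _ hpre
  unfold Spec_define_user_popularities define_user_popularities define_user_popularities_alt
  rw [PySem.Dict.items_foldl_insert_fresh ups Prod.fst
        (fun up => pvPopA (PySem.Dict.ofList lps) up.2) PySem.Dict.empty
        (fun a _ => PySem.Dict.contains_empty _) hpre.1]
  simp only [PySem.Dict.empty, List.nil_append]
  refine List.map_congr_left (fun up _ => ?_)
  rw [pvPopA_eq_pvW, pvScore_eq]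
  simp
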